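-- pv_equiv track=rewrite | github.com/OH6BG/eibi2kiwi | eibi2kiwi_online.py | create_weekly_binstring
-- ===== SOURCE A (Python) =====
-- def create_weekly_binstring(bin_strings):
--     """
--     Create a combined weekly bin string from a list of weekday bin strings
--     Also one argument is OK
--     """
--     result = ""
--     for bits in zip(*bin_strings):
--         if any(bit == "1" for bit in bits):
--             result += "1"
--         else:
--             result += "0"
--     return result
-- ===== SOURCE B (Python) =====
-- def create_weekly_binstring(bin_strings):
--     n = min((len(s) for s in bin_strings), default=0)
--     result = ["0"] * n
--     for s in bin_strings:
--         for i in range(n):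
--             if s[i] == "1":
--                 result[i] = "1"
--     return "".join(result)
-- ===== Notes on version B (the rewrite author's own statement) =====
-- stated objective: alternative
-- what changed: Replaces A's column-major transpose (zip of all strings, any() per column) with row-major accumulation: a '0'-filled result array of the minimum length is updated in one pass per input string, setting a position to '1' whenever that string has '1' there.
import Mathlib
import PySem

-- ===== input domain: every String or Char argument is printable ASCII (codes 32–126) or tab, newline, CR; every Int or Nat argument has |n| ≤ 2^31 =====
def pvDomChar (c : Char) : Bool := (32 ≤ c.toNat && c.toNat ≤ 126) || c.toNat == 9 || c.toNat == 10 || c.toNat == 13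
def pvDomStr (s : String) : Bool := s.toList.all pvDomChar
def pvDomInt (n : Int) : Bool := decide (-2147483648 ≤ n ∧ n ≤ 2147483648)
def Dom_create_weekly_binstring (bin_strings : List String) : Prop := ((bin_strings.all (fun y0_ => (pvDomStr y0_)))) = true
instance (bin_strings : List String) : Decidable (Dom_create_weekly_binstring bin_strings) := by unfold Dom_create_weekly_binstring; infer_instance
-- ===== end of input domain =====

-- B replaces A's column-major transpose (zip + any per column) with row-major
-- accumulation into a '0'-filled result array; objective: alternative (same cost).

-- shared helper: the number of columns zip(*bin_strings) yields in A = the minimum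
-- string length B computes (0 for the empty list)
def pvMinLen (l : List String) : Nat :=
  match l with
  | [] => 0
  | s :: rest => rest.foldl (fun m t => min m t.toList.length) s.toList.length

-- ===== PORT A =====
-- for bits in zip(*bin_strings): column i holds s[i] for each s; zip stops at the shortest
def create_weekly_binstring (bin_strings : List String) : String :=
  String.mk ((List.range (pvMinLen bin_strings)).foldl
    (fun result i =>
      result ++ [if bin_strings.any (fun s => s.toList.getD i ' ' == '1') then '1' else '0'])
    [])

-- ===== PORT B =====
def create_weekly_binstring_alt (bin_strings : List String) : String :=
  let n := pvMinLen bin_strings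
  String.mk (bin_strings.foldl
    (fun result s =>
      (List.range n).foldl
        (fun result i => if s.toList.getD i ' ' == '1' then result.set i '1' else result)
        result)
    (List.replicate n '0'))

-- ===== PRECONDITION & SPEC =====
def Spec_create_weekly_binstring (bin_strings : List String) (out : String) : Prop := out = create_weekly_binstring_alt bin_strings
instance (bin_strings : List String) (out : String) : Decidable (Spec_create_weekly_binstring bin_strings out) := by unfold Spec_create_weekly_binstring; infer_instance

-- ===== CLAIM (what is proved, stated in full; the proofs are below) =====
def Claim_equal_create_weekly_binstring : Prop := ∀ (bin_strings : List String), Dom_create_weekly_binstring bin_strings → Spec_create_weekly_binstring bin_strings (create_weekly_binstring bin_strings)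

-- ===== LEMMAS AND PROOFS =====

theorem pv_foldl_append_map {α β : Type} (f : α → β) (l : List α) (acc : List β) :
    l.foldl (fun r x => r ++ [f x]) acc = acc ++ l.map f := by
  induction l generalizing acc with
  | nil => simp
  | cons x xs ih => simp [List.foldl, ih]

theorem pv_inner_length (q : Nat → Bool) (idxs : List Nat) (r : List Char) :
    (idxs.foldl (fun r j => if q j then r.set j '1' else r) r).length = r.length := by
  induction idxs generalizing r with
  | nil => rfl
  | cons j rest ih => simp [List.foldl, ih]; split <;> simp

theorem pv_inner_getD (q : Nat → Bool) (idxs : List Nat) (r : List Char) (i : Nat)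
    (hi : i < r.length) :
    (idxs.foldl (fun r j => if q j then r.set j '1' else r) r).getD i ' '
      = if i ∈ idxs ∧ q i then '1' else r.getD i ' ' := by
  induction idxs generalizing r with
  | nil => simp
  | cons j rest ih =>
    have hlen : i < (if q j then r.set j '1' else r).length := by
      split <;> simpa using hi
    rw [List.foldl_cons, ih _ hlen]
    by_cases hm : i ∈ rest ∧ q i
    · have : i ∈ j :: rest ∧ q i := ⟨List.mem_cons.mpr (Or.inr hm.1), hm.2⟩
      rw [if_pos hm, if_pos this]
    · rw [if_neg hm]
      by_cases hc : i ∈ j :: rest ∧ q i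
      · have hij : i = j := by
          rcases List.mem_cons.mp hc.1 with h | h
          · exact h
          · exact absurd ⟨h, hc.2⟩ hm
        have hqj : q j = true := hij ▸ hc.2
        rw [if_pos hc, if_pos hqj, ← hij]
        simp [List.getD_eq_getElem?_getD, hi]
      · rw [if_neg hc]
        by_cases hq : q j
        · have hij : j ≠ i := by
            intro h
            exact hc ⟨List.mem_cons.mpr (Or.inl h.symm), h ▸ hq⟩
          rw [if_pos hq]
          simp [List.getD_eq_getElem?_getD, List.getElem?_set_ne hij]
        · rw [if_neg hq]

theorem pv_outer_length (p : Nat → String → Bool) (l : List String) (n : Nat) (r : List Char) :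
    (l.foldl (fun r s => (List.range n).foldl
        (fun r i => if p i s then r.set i '1' else r) r) r).length = r.length := by
  induction l generalizing r with
  | nil => rfl
  | cons s rest ih => rw [List.foldl_cons, ih, pv_inner_length]

theorem pv_outer_getD (p : Nat → String → Bool) (l : List String) (n : Nat) (r : List Char)
    (hr : r.length = n) (i : Nat) (hi : i < n) :
    (l.foldl (fun r s => (List.range n).foldl
        (fun r i => if p i s then r.set i '1' else r) r) r).getD i ' '
      = if l.any (p i) then '1' else r.getD i ' ' := by
  induction l generalizing r with
  | nil => simp
  | cons s rest ih =>
    rw [List.foldl_cons, ih _ (by rw [pv_inner_length]; exact hr),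
      pv_inner_getD _ _ _ _ (by omega)]
    simp only [List.mem_range, hi, true_and, List.any_cons]
    by_cases hrest : rest.any (p i)
    · simp [hrest]
    · by_cases hs : p i s <;> simp [hs, hrest]

-- ===== VERDICT (by name: the statement is the Claim_ definition above) =====
theorem create_weekly_binstring_spec : Claim_equal_create_weekly_binstring := by
  intro bin_strings _
  unfold Spec_create_weekly_binstring create_weekly_binstring create_weekly_binstring_alt
  set n := pvMinLen bin_strings with hn
  apply congrArg String.mk
  have hlenB : (bin_strings.foldl (fun result s => (List.range n).foldl
      (fun result i => if s.toList.getD i ' ' == '1' then result.set i '1' else result) result)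
      (List.replicate n '0')).length = n := by
    rw [pv_outer_length (fun i s => s.toList.getD i ' ' == '1')]; simp
  rw [pv_foldl_append_map]
  apply List.ext_getElem
  · simpa using hlenB.symm
  · intro i h1 h2
    have hi : i < n := by simpa using h1
    have hgd := pv_outer_getD (fun i s => s.toList.getD i ' ' == '1') bin_strings n
      (List.replicate n '0') (by simp) i hi
    rw [List.getD_eq_getElem?_getD, List.getElem?_eq_getElem h2] at hgd
    simp only [Option.getD_some] at hgd
    rw [hgd]
    simp [hi, List.getD_eq_getElem?_getD]
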